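-- pv_equiv track=rewrite | github.com/pedersor/cond_prob_dft | utils.py | latex_to_dir
-- ===== SOURCE A (Python) =====
-- def latex_to_dir(in_string, reverse=False):
--   """ converts latex str format to directory. If reverse=True, then
--   converts directory str to latex format.
--
--   Note: basic ions only.
--   """
--
--   subs = [
--       ('$^+$', '_p'),
--       ('$^{++}$', '_2p'),
--       ('$^{3+}$', '_3p'),
--   ]
--
--   if type(in_string) != str:
--     in_string = str(in_string)
--
--   if reverse:
--     subs = [(sub[1], sub[0]) for sub in subs]
--     out_string = in_string.capitalize()
--   else:
--     out_string = in_string.lower()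
--
--   for old, new in subs:
--     out_string = out_string.replace(old, new)
--
--   return out_string
-- ===== SOURCE B (Python) =====
-- def latex_to_dir(in_string, reverse=False):
--   """ converts latex str format to directory. If reverse=True, then
--   converts directory str to latex format.
--
--   Note: basic ions only.
--   """
--
--   subs = [
--       ('$^+$', '_p'),
--       ('$^{++}$', '_2p'),
--       ('$^{3+}$', '_3p'),
--   ]
--
--   if type(in_string) != str:
--     in_string = str(in_string)
--
--   if reverse:
--     subs = [(sub[1], sub[0]) for sub in subs]
--     out_string = in_string.capitalize()
--   else:
--     out_string = in_string.lower()
--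
--   # single left-to-right pass: at each position emit the first matching
--   # substitution (in subs order) and skip it, else copy one character
--   pieces = []
--   i = 0
--   n = len(out_string)
--   while i < n:
--     for old, new in subs:
--       if out_string.startswith(old, i):
--         pieces.append(new)
--         i += len(old)
--         break
--     else:
--       pieces.append(out_string[i])
--       i += 1
--
--   return ''.join(pieces)
-- ===== Notes on version B (the rewrite author's own statement) =====
-- stated objective: alternative
-- what changed: Replaces the three sequential full-string str.replace passes by a single left-to-right scan that, at each position, emits the first matching substitution and skips it; Pre_ excludes forward (reverse=False) inputs whose lowercased form contains one ion token immediately overlapping the next ('$^{++}$^+$', '$^{3+}$^+$' or '$^{3+}$^{++}$'), where A's pass order and B's position order resolve the overlap differently and both mangled outputs are equally accidental.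
-- outside the precondition, e.g. on latex_to_dir('$^{++}$^+$', False): A returns '$^{++}_p', B returns '_2p^+$'
import Mathlib
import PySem

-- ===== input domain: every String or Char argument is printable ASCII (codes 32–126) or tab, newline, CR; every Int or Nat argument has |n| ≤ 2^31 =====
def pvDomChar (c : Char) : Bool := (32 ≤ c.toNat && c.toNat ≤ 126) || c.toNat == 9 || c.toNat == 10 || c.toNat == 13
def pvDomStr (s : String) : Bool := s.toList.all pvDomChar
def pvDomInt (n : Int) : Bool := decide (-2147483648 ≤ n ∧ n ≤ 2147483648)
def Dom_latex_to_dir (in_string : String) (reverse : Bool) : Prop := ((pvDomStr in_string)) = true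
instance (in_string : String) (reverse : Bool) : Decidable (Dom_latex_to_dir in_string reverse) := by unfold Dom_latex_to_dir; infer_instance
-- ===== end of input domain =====

-- B replaces A's three sequential str.replace passes by a single left-to-right first-match scan; Pre_ excludes overlapping-token inputs where the two strategies resolve the overlap differently (equality of return values is what is proved).


-- Python str.capitalize(): first character uppercased, the rest lowercased (exact on the ASCII domain; both Pythons use it)
def pyCapitalize (s : String) : String :=
  String.ofList (match s.toList with
    | [] => []
    | c :: t => PySem.Chars.upperChar c :: PySem.Chars.lower t)

-- ===== PORT A =====
-- literal port of A: fixed subs list (inverted when reverse), capitalize/lower pre-step,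
-- then one str.replace pass over the whole string per pair, in order.  The
-- `type(in_string) != str` branch can never fire here: in_string is a str by the type convention.
def latex_to_dir (in_string : String) (reverse : Bool) : String :=
  let subs : List (String × String) := [("$^+$", "_p"), ("$^{++}$", "_2p"), ("$^{3+}$", "_3p")]
  if reverse then
    let subs := subs.map (fun sub => (sub.2, sub.1))
    let out_string := pyCapitalize in_string
    subs.foldl (fun out_string p => PySem.Str.replace out_string p.1 p.2) out_string
  else
    let out_string := PySem.Str.lower in_string
    subs.foldl (fun out_string p => PySem.Str.replace out_string p.1 p.2) out_string

-- ===== PORT B =====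
-- B's while loop: one left-to-right pass; at each position emit the first substitution
-- (in subs order) whose key starts here and skip the key, else copy one character.
def scanSubs (subs : List (List Char × List Char)) : List Char → List Char
  | [] => []
  | c :: t =>
    match subs.find? (fun p => p.1.isPrefixOf (c :: t)) with
    | some p => p.2 ++ scanSubs subs (t.drop (p.1.length - 1))
    | none => c :: scanSubs subs t
termination_by l => l.length
decreasing_by all_goals (simp; try omega)

def latex_to_dir_alt (in_string : String) (reverse : Bool) : String :=
  let subs : List (List Char × List Char) :=
    [("$^+$".toList, "_p".toList), ("$^{++}$".toList, "_2p".toList), ("$^{3+}$".toList, "_3p".toList)]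
  let subs := if reverse then subs.map (fun sub => (sub.2, sub.1)) else subs
  let out_string := if reverse then pyCapitalize in_string else PySem.Str.lower in_string
  String.ofList (scanSubs subs out_string.toList)

-- ===== PRECONDITION & SPEC =====
-- Pre_ excludes forward (reverse=False) inputs whose lowercased form contains one ion token
-- immediately overlapping the next ('$^{++}$^+$', '$^{3+}$^+$' or '$^{3+}$^{++}$'): there A's
-- pass order and B's position order resolve the overlap differently and both mangled outputs
-- are equally accidental.
def Pre_latex_to_dir (in_string : String) (reverse : Bool) : Prop :=
  reverse = true ∨
    (PySem.Str.isIn "$^{++}$^+$" (PySem.Str.lower in_string) = false ∧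
     PySem.Str.isIn "$^{3+}$^+$" (PySem.Str.lower in_string) = false ∧
     PySem.Str.isIn "$^{3+}$^{++}$" (PySem.Str.lower in_string) = false)
instance (in_string : String) (reverse : Bool) : Decidable (Pre_latex_to_dir in_string reverse) := by
  unfold Pre_latex_to_dir; infer_instance
def pvWitness_latex_to_dir : String × Bool := ("He$^+$ and Li$^{++}$", false)

def Spec_latex_to_dir (in_string : String) (reverse : Bool) (out : String) : Prop := out = latex_to_dir_alt in_string reverse
instance (in_string : String) (reverse : Bool) (out : String) : Decidable (Spec_latex_to_dir in_string reverse out) := by unfold Spec_latex_to_dir; infer_instance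

-- ===== CLAIM (what is proved, stated in full; the proofs are below) =====
def Claim_equal_latex_to_dir : Prop := ∀ (in_string : String) (reverse : Bool), Dom_latex_to_dir in_string reverse → Pre_latex_to_dir in_string reverse → Spec_latex_to_dir in_string reverse (latex_to_dir in_string reverse)

-- ===== LEMMAS AND PROOFS =====

lemma go_succ (old new : List Char) (f : Nat) (c : Char) (t acc : List Char) :
    PySem.Chars.replace.go old new (f+1) (c::t) acc
      = if old.isPrefixOf (c::t) then PySem.Chars.replace.go old new f (List.drop old.length (c::t)) (new.reverse ++ acc)
        else PySem.Chars.replace.go old new f t (c::acc) := rfl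

lemma go_acc (old new : List Char) :
    ∀ (fuel : Nat) (l acc : List Char),
      PySem.Chars.replace.go old new fuel l acc = acc.reverse ++ PySem.Chars.replace.go old new fuel l [] := by
  intro fuel
  induction fuel with
  | zero => intro l acc; simp [PySem.Chars.replace.go]
  | succ f ih =>
    intro l acc
    cases l with
    | nil => simp [PySem.Chars.replace.go]
    | cons c t =>
      simp only [PySem.Chars.replace.go]
      by_cases h : old.isPrefixOf (c :: t)
      · simp only [h, if_true]
        rw [ih (List.drop old.length (c :: t)) (new.reverse ++ acc),
            ih (List.drop old.length (c :: t)) (new.reverse ++ [])]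
        simp
      · simp only [h]
        rw [ih t (c :: acc), ih t [c]]
        simp

lemma go_fuel (old new : List Char) (hold : old ≠ []) :
    ∀ (fuel fuel' : Nat) (l : List Char), l.length ≤ fuel → l.length ≤ fuel' →
      PySem.Chars.replace.go old new fuel l [] = PySem.Chars.replace.go old new fuel' l [] := by
  intro fuel
  induction fuel with
  | zero =>
    intro fuel' l h h'
    have : l = [] := List.eq_nil_of_length_eq_zero (Nat.le_zero.mp h)
    subst this
    cases fuel' <;> simp [PySem.Chars.replace.go]
  | succ f ih =>
    intro fuel' l h h'
    cases l with
    | nil => cases fuel' <;> simp [PySem.Chars.replace.go]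
    | cons c t =>
      cases fuel' with
      | zero => simp at h'
      | succ f' =>
        have hop : 0 < old.length := List.length_pos_of_ne_nil hold
        simp only [PySem.Chars.replace.go]
        by_cases hp : old.isPrefixOf (c :: t)
        · simp only [hp, if_true]
          rw [go_acc, go_acc old new f']
          have hd : (List.drop old.length (c :: t)).length ≤ f := by
            simp only [List.length_drop, List.length_cons] at *
            omega
          have hd' : (List.drop old.length (c :: t)).length ≤ f' := by
            simp only [List.length_drop, List.length_cons] at *
            omega
          rw [ih f' _ hd hd']
        · have ht : t.length ≤ f := by simp at h; omega
          have ht' : t.length ≤ f' := by simp at h'; omega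
          simp only [hp, Bool.false_eq_true, if_false]
          rw [go_acc old new f t [c], go_acc old new f' t [c], ih f' t ht ht']

lemma replace_eq_go (old new l : List Char) (hold : old ≠ []) :
    PySem.Chars.replace l old new = PySem.Chars.replace.go old new l.length l [] := by
  simp [PySem.Chars.replace, List.isEmpty_iff, hold]

lemma replace_nil (old new : List Char) (hold : old ≠ []) :
    PySem.Chars.replace [] old new = [] := by
  rw [replace_eq_go _ _ _ hold]
  rfl

lemma replace_cons (old new : List Char) (c : Char) (t : List Char) (h : ¬ old <+: (c :: t)) :
    PySem.Chars.replace (c :: t) old new = c :: PySem.Chars.replace t old new := by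
  have hold : old ≠ [] := by rintro rfl; exact h (List.nil_prefix)
  have hp : old.isPrefixOf (c :: t) = false := by
    rw [← Bool.not_eq_true, List.isPrefixOf_iff_prefix]; exact h
  rw [replace_eq_go _ _ _ hold, replace_eq_go _ _ _ hold]
  simp only [List.length_cons, PySem.Chars.replace.go, hp, Bool.false_eq_true, if_false]
  rw [go_acc]
  simp

lemma replace_head (old new r : List Char) (hold : old ≠ []) :
    PySem.Chars.replace (old ++ r) old new = new ++ PySem.Chars.replace r old new := by
  obtain ⟨c, o', rfl⟩ : ∃ c o', old = c :: o' := by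
    cases old with
    | nil => exact absurd rfl hold
    | cons c o' => exact ⟨c, o', rfl⟩
  have hp : (c :: o').isPrefixOf (c :: o' ++ r) = true := by
    rw [List.isPrefixOf_iff_prefix]; exact List.prefix_append _ _
  rw [replace_eq_go _ _ _ hold, replace_eq_go _ _ _ hold]
  have hlen : (c :: o' ++ r).length = (o'.length + r.length) + 1 := by simp
  have hp' : (c :: o').isPrefixOf (c :: (o' ++ r)) = true := hp
  rw [hlen, show (c :: o') ++ r = c :: (o' ++ r) from rfl, go_succ, if_pos hp']
  rw [show List.drop (c :: o').length (c :: (o' ++ r)) = r from by simp]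
  rw [go_acc]
  simp only [List.reverse_reverse, List.append_nil]
  rw [go_fuel _ _ hold (o'.length + r.length) r.length r (by omega) (le_refl _)]

lemma replace_push (old new : List Char) :
    ∀ (a x : List Char), (∀ a', a' <:+ a → a' ≠ [] → ¬ old <+: (a' ++ x)) →
      PySem.Chars.replace (a ++ x) old new = a ++ PySem.Chars.replace x old new := by
  intro a
  induction a with
  | nil => intro x h; simp
  | cons c a' ih =>
    intro x h
    have h1 : ¬ old <+: (c :: (a' ++ x)) := by
      have := h (c :: a') (List.suffix_refl _) (List.cons_ne_nil _ _)
      simpa using this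
    rw [List.cons_append, replace_cons _ _ _ _ h1,
        ih x (fun b hs hne => h b (hs.trans (List.suffix_cons c a')) hne), List.cons_append]

lemma prefix_of_replace (old new : List Char) (hold : old ≠ []) (hnew : new ≠ []) :
    ∀ (n : Nat) (p t : List Char), t.length ≤ n → new.headI ∉ p →
      p <+: PySem.Chars.replace t old new → p <+: t := by
  intro n
  induction n with
  | zero =>
    intro p t hlen _ hpre
    have : t = [] := List.eq_nil_of_length_eq_zero (Nat.le_zero.mp hlen)
    subst this
    rwa [replace_nil _ _ hold] at hpre
  | succ m ih =>
    intro p t hlen hhead hpre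
    cases t with
    | nil => rwa [replace_nil _ _ hold] at hpre
    | cons c t' =>
      by_cases hm : old <+: (c :: t')
      · obtain ⟨r, hr⟩ := hm
        rw [← hr, replace_head _ _ _ hold] at hpre
        cases p with
        | nil => exact List.nil_prefix
        | cons q p' =>
          exfalso
          obtain ⟨vh, v', rfl⟩ : ∃ vh v', new = vh :: v' := by
            cases new with
            | nil => exact absurd rfl hnew
            | cons vh v' => exact ⟨vh, v', rfl⟩
          rw [List.cons_append, List.cons_prefix_cons] at hpre
          exact hhead (hpre.1 ▸ List.mem_cons_self)
      · rw [replace_cons _ _ _ _ hm] at hpre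
        cases p with
        | nil => exact List.nil_prefix
        | cons q p' =>
          rw [List.cons_prefix_cons] at hpre
          have hp' : p' <+: t' := by
            apply ih p' t' (by simpa using Nat.lt_succ_iff.mp (by simpa using hlen))
              (fun hmem => hhead (List.mem_cons_of_mem _ hmem)) hpre.2
          rw [hpre.1, List.cons_prefix_cons]
          exact ⟨rfl, hp'⟩

lemma infix_mono {pat l t : List Char} (h : ¬ pat <:+: l) (hs : t <:+ l) : ¬ pat <:+: t :=
  fun hi => h (hi.trans hs.isInfix)

lemma main_fwd : ∀ (n : Nat) (l : List Char), l.length ≤ n →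
    ¬ (['$','^','{','+','+','}','$','^','+','$'] <:+: l) →
    ¬ (['$','^','{','3','+','}','$','^','+','$'] <:+: l) →
    ¬ (['$','^','{','3','+','}','$','^','{','+','+','}','$'] <:+: l) →
    scanSubs [(['$','^','+','$'], ['_','p']), (['$','^','{','+','+','}','$'], ['_','2','p']), (['$','^','{','3','+','}','$'], ['_','3','p'])] l
      = PySem.Chars.replace (PySem.Chars.replace (PySem.Chars.replace l ['$','^','+','$'] ['_','p'])
          ['$','^','{','+','+','}','$'] ['_','2','p']) ['$','^','{','3','+','}','$'] ['_','3','p'] := by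
  intro n
  induction n with
  | zero =>
    intro l hlen _ _ _
    have : l = [] := List.eq_nil_of_length_eq_zero (Nat.le_zero.mp hlen)
    subst this
    rw [scanSubs, replace_nil _ _ (by decide), replace_nil _ _ (by decide), replace_nil _ _ (by decide)]
  | succ m ih =>
    intro l hlen hc1 hc2 hc3
    cases l with
    | nil =>
      rw [scanSubs, replace_nil _ _ (by decide), replace_nil _ _ (by decide), replace_nil _ _ (by decide)]
    | cons c t =>
      by_cases h1 : (['$','^','+','$'] : List Char) <+: (c :: t)
      · -- k1 matches here
        obtain ⟨r, hr⟩ := h1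
        rw [← hr]
        rw [replace_head _ _ _ (by decide)]
        rw [replace_push ['$','^','{','+','+','}','$'] ['_','2','p'] ['_','p'] _ (by
          intro a' hs hne hp
          simp [List.suffix_cons_iff] at hs
          rcases hs with rfl | rfl | rfl
          · simp [List.cons_prefix_cons] at hp
          · simp [List.cons_prefix_cons] at hp
          · exact hne rfl)]
        rw [replace_push ['$','^','{','3','+','}','$'] ['_','3','p'] ['_','p'] _ (by
          intro a' hs hne hp
          simp [List.suffix_cons_iff] at hs
          rcases hs with rfl | rfl | rfl
          · simp [List.cons_prefix_cons] at hp
          · simp [List.cons_prefix_cons] at hp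
          · exact hne rfl)]
        rw [show (['$','^','+','$'] : List Char) ++ r = '$'::'^'::'+'::'$'::r from rfl]
        rw [scanSubs]
        simp only [List.find?, List.isPrefixOf]
        simp
        have hsuffr : r <:+ c :: t := by
          rw [← hr]; exact ⟨['$','^','+','$'], rfl⟩
        rw [ih r (by have hL := congrArg List.length hr; simp at hL; simp at hlen; omega)
              (infix_mono hc1 hsuffr) (infix_mono hc2 hsuffr) (infix_mono hc3 hsuffr)]
      · by_cases h2 : (['$','^','{','+','+','}','$'] : List Char) <+: (c :: t)
        · obtain ⟨r, hr⟩ := h2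
          rw [← hr]
          rw [replace_push ['$','^','+','$'] ['_','p'] ['$','^','{','+','+','}','$'] _ (by
            intro a' hs hne hp
            simp [List.suffix_cons_iff] at hs
            rcases hs with rfl | rfl | rfl | rfl | rfl | rfl | rfl | rfl
            · simp [List.cons_prefix_cons] at hp
            · simp [List.cons_prefix_cons] at hp
            · simp [List.cons_prefix_cons] at hp
            · simp [List.cons_prefix_cons] at hp
            · simp [List.cons_prefix_cons] at hp
            · simp [List.cons_prefix_cons] at hp
            · -- a' = ['$'] : a real overlap, excluded by hc1
              simp only [List.cons_prefix_cons, List.singleton_append] at hp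
              obtain ⟨-, hp⟩ := hp
              obtain ⟨q, hq⟩ := hp
              exact hc1 (List.IsPrefix.isInfix (by
                refine ⟨q, ?_⟩
                rw [← hr, ← hq]
                rfl))
            · exact hne rfl)]
          rw [replace_head _ _ _ (by decide)]
          rw [replace_push ['$','^','{','3','+','}','$'] ['_','3','p'] ['_','2','p'] _ (by
            intro a' hs hne hp
            simp [List.suffix_cons_iff] at hs
            rcases hs with rfl | rfl | rfl | rfl
            · simp [List.cons_prefix_cons] at hp
            · simp [List.cons_prefix_cons] at hp
            · simp [List.cons_prefix_cons] at hp
            · exact hne rfl)]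
          rw [show (['$','^','{','+','+','}','$'] : List Char) ++ r = '$'::'^'::'{'::'+'::'+'::'}'::'$'::r from rfl]
          rw [scanSubs]
          simp only [List.find?, List.isPrefixOf]
          simp
          have hsuffr : r <:+ c :: t := by
            rw [← hr]; exact ⟨['$','^','{','+','+','}','$'], rfl⟩
          rw [ih r (by have hL := congrArg List.length hr; simp at hL; simp at hlen; omega)
                (infix_mono hc1 hsuffr) (infix_mono hc2 hsuffr) (infix_mono hc3 hsuffr)]
        · by_cases h3 : (['$','^','{','3','+','}','$'] : List Char) <+: (c :: t)
          · obtain ⟨r, hr⟩ := h3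
            rw [← hr]
            rw [replace_push ['$','^','+','$'] ['_','p'] ['$','^','{','3','+','}','$'] _ (by
              intro a' hs hne hp
              simp [List.suffix_cons_iff] at hs
              rcases hs with rfl | rfl | rfl | rfl | rfl | rfl | rfl | rfl
              · simp [List.cons_prefix_cons] at hp
              · simp [List.cons_prefix_cons] at hp
              · simp [List.cons_prefix_cons] at hp
              · simp [List.cons_prefix_cons] at hp
              · simp [List.cons_prefix_cons] at hp
              · simp [List.cons_prefix_cons] at hp
              · simp only [List.cons_prefix_cons, List.singleton_append] at hp
                obtain ⟨-, hp⟩ := hp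
                obtain ⟨q, hq⟩ := hp
                exact hc2 (List.IsPrefix.isInfix (by
                  refine ⟨q, ?_⟩
                  rw [← hr, ← hq]
                  rfl))
              · exact hne rfl)]
            rw [replace_push ['$','^','{','+','+','}','$'] ['_','2','p'] ['$','^','{','3','+','}','$'] _ (by
              intro a' hs hne hp
              simp [List.suffix_cons_iff] at hs
              rcases hs with rfl | rfl | rfl | rfl | rfl | rfl | rfl | rfl
              · simp [List.cons_prefix_cons] at hp
              · simp [List.cons_prefix_cons] at hp
              · simp [List.cons_prefix_cons] at hp
              · simp [List.cons_prefix_cons] at hp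
              · simp [List.cons_prefix_cons] at hp
              · simp [List.cons_prefix_cons] at hp
              · -- a' = ['$'] before replace-output of pass 1: pattern must already be in r
                simp only [List.cons_prefix_cons, List.singleton_append] at hp
                obtain ⟨-, hp⟩ := hp
                have hp' : ['^','{','+','+','}','$'] <+: r :=
                  prefix_of_replace ['$','^','+','$'] ['_','p'] (by decide) (by decide)
                    r.length _ r (le_refl _) (by decide) hp
                obtain ⟨q, hq⟩ := hp'
                exact hc3 (List.IsPrefix.isInfix (by
                  refine ⟨q, ?_⟩
                  rw [← hr, ← hq]
                  rfl))
              · exact hne rfl)]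
            rw [replace_head _ _ _ (by decide)]
            rw [show (['$','^','{','3','+','}','$'] : List Char) ++ r = '$'::'^'::'{'::'3'::'+'::'}'::'$'::r from rfl]
            rw [scanSubs]
            simp only [List.find?, List.isPrefixOf]
            simp
            have hsuffr : r <:+ c :: t := by
              rw [← hr]; exact ⟨['$','^','{','3','+','}','$'], rfl⟩
            rw [ih r (by have hL := congrArg List.length hr; simp at hL; simp at hlen; omega)
                  (infix_mono hc1 hsuffr) (infix_mono hc2 hsuffr) (infix_mono hc3 hsuffr)]
          · -- no key starts here
            have hb1 : (['$','^','+','$'] : List Char).isPrefixOf (c::t) = false := by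
              rw [← Bool.not_eq_true, List.isPrefixOf_iff_prefix]; exact h1
            have hb2 : (['$','^','{','+','+','}','$'] : List Char).isPrefixOf (c::t) = false := by
              rw [← Bool.not_eq_true, List.isPrefixOf_iff_prefix]; exact h2
            have hb3 : (['$','^','{','3','+','}','$'] : List Char).isPrefixOf (c::t) = false := by
              rw [← Bool.not_eq_true, List.isPrefixOf_iff_prefix]; exact h3
            rw [scanSubs]
            simp only [List.find?, hb1, hb2, hb3]
            rw [replace_cons _ _ _ _ h1]
            have h2' : ¬ (['$','^','{','+','+','}','$'] : List Char) <+: (c :: PySem.Chars.replace t ['$','^','+','$'] ['_','p']) := by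
              intro hp
              rw [← replace_cons _ _ _ _ h1] at hp
              exact h2 (prefix_of_replace ['$','^','+','$'] ['_','p'] (by decide) (by decide)
                (c::t).length _ (c::t) (le_refl _) (by decide) hp)
            rw [replace_cons _ _ _ _ h2']
            have h3' : ¬ (['$','^','{','3','+','}','$'] : List Char) <+:
                (c :: PySem.Chars.replace (PySem.Chars.replace t ['$','^','+','$'] ['_','p']) ['$','^','{','+','+','}','$'] ['_','2','p']) := by
              intro hp
              rw [← replace_cons _ _ _ _ h2', ← replace_cons _ _ _ _ h1] at hp
              have := prefix_of_replace ['$','^','{','+','+','}','$'] ['_','2','p'] (by decide) (by decide)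
                (PySem.Chars.replace (c::t) ['$','^','+','$'] ['_','p']).length _ _ (le_refl _) (by decide) hp
              exact h3 (prefix_of_replace ['$','^','+','$'] ['_','p'] (by decide) (by decide)
                (c::t).length _ (c::t) (le_refl _) (by decide) this)
            rw [replace_cons _ _ _ _ h3']
            have hsufft : t <:+ c :: t := ⟨[c], rfl⟩
            rw [ih t (by simp at hlen; omega)
                  (infix_mono hc1 hsufft) (infix_mono hc2 hsufft) (infix_mono hc3 hsufft)]

lemma main_rev : ∀ (n : Nat) (l : List Char), l.length ≤ n →
    scanSubs [(['_','p'], ['$','^','+','$']), (['_','2','p'], ['$','^','{','+','+','}','$']), (['_','3','p'], ['$','^','{','3','+','}','$'])] l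
      = PySem.Chars.replace (PySem.Chars.replace (PySem.Chars.replace l ['_','p'] ['$','^','+','$'])
          ['_','2','p'] ['$','^','{','+','+','}','$']) ['_','3','p'] ['$','^','{','3','+','}','$'] := by
  intro n
  induction n with
  | zero =>
    intro l hlen
    have : l = [] := List.eq_nil_of_length_eq_zero (Nat.le_zero.mp hlen)
    subst this
    rw [scanSubs, replace_nil _ _ (by decide), replace_nil _ _ (by decide), replace_nil _ _ (by decide)]
  | succ m ih =>
    intro l hlen
    cases l with
    | nil =>
      rw [scanSubs, replace_nil _ _ (by decide), replace_nil _ _ (by decide), replace_nil _ _ (by decide)]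
    | cons c t =>
      by_cases h1 : (['_','p'] : List Char) <+: (c :: t)
      · obtain ⟨r, hr⟩ := h1
        rw [← hr]
        rw [replace_head _ _ _ (by decide)]
        rw [replace_push ['_','2','p'] ['$','^','{','+','+','}','$'] ['$','^','+','$'] _ (by
          intro a' hs hne hp
          simp [List.suffix_cons_iff] at hs
          rcases hs with rfl | rfl | rfl | rfl | rfl
          · simp [List.cons_prefix_cons] at hp
          · simp [List.cons_prefix_cons] at hp
          · simp [List.cons_prefix_cons] at hp
          · simp [List.cons_prefix_cons] at hp
          · exact hne rfl)]
        rw [replace_push ['_','3','p'] ['$','^','{','3','+','}','$'] ['$','^','+','$'] _ (by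
          intro a' hs hne hp
          simp [List.suffix_cons_iff] at hs
          rcases hs with rfl | rfl | rfl | rfl | rfl
          · simp [List.cons_prefix_cons] at hp
          · simp [List.cons_prefix_cons] at hp
          · simp [List.cons_prefix_cons] at hp
          · simp [List.cons_prefix_cons] at hp
          · exact hne rfl)]
        rw [show (['_','p'] : List Char) ++ r = '_'::'p'::r from rfl]
        rw [scanSubs]
        simp only [List.find?, List.isPrefixOf]
        simp
        rw [ih r (by have hL := congrArg List.length hr; simp at hL; simp at hlen; omega)]
      · by_cases h2 : (['_','2','p'] : List Char) <+: (c :: t)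
        · obtain ⟨r, hr⟩ := h2
          rw [← hr]
          rw [replace_push ['_','p'] ['$','^','+','$'] ['_','2','p'] _ (by
            intro a' hs hne hp
            simp [List.suffix_cons_iff] at hs
            rcases hs with rfl | rfl | rfl | rfl
            · simp [List.cons_prefix_cons] at hp
            · simp [List.cons_prefix_cons] at hp
            · simp [List.cons_prefix_cons] at hp
            · exact hne rfl)]
          rw [replace_head _ _ _ (by decide)]
          rw [replace_push ['_','3','p'] ['$','^','{','3','+','}','$'] ['$','^','{','+','+','}','$'] _ (by
            intro a' hs hne hp
            simp [List.suffix_cons_iff] at hs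
            rcases hs with rfl | rfl | rfl | rfl | rfl | rfl | rfl | rfl
            · simp [List.cons_prefix_cons] at hp
            · simp [List.cons_prefix_cons] at hp
            · simp [List.cons_prefix_cons] at hp
            · simp [List.cons_prefix_cons] at hp
            · simp [List.cons_prefix_cons] at hp
            · simp [List.cons_prefix_cons] at hp
            · simp [List.cons_prefix_cons] at hp
            · exact hne rfl)]
          rw [show (['_','2','p'] : List Char) ++ r = '_'::'2'::'p'::r from rfl]
          rw [scanSubs]
          simp only [List.find?, List.isPrefixOf]
          simp
          rw [ih r (by have hL := congrArg List.length hr; simp at hL; simp at hlen; omega)]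
        · by_cases h3 : (['_','3','p'] : List Char) <+: (c :: t)
          · obtain ⟨r, hr⟩ := h3
            rw [← hr]
            rw [replace_push ['_','p'] ['$','^','+','$'] ['_','3','p'] _ (by
              intro a' hs hne hp
              simp [List.suffix_cons_iff] at hs
              rcases hs with rfl | rfl | rfl | rfl
              · simp [List.cons_prefix_cons] at hp
              · simp [List.cons_prefix_cons] at hp
              · simp [List.cons_prefix_cons] at hp
              · exact hne rfl)]
            rw [replace_push ['_','2','p'] ['$','^','{','+','+','}','$'] ['_','3','p'] _ (by
              intro a' hs hne hp
              simp [List.suffix_cons_iff] at hs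
              rcases hs with rfl | rfl | rfl | rfl
              · simp [List.cons_prefix_cons] at hp
              · simp [List.cons_prefix_cons] at hp
              · simp [List.cons_prefix_cons] at hp
              · exact hne rfl)]
            rw [replace_head _ _ _ (by decide)]
            rw [show (['_','3','p'] : List Char) ++ r = '_'::'3'::'p'::r from rfl]
            rw [scanSubs]
            simp only [List.find?, List.isPrefixOf]
            simp
            rw [ih r (by have hL := congrArg List.length hr; simp at hL; simp at hlen; omega)]
          · have hb1 : (['_','p'] : List Char).isPrefixOf (c::t) = false := by
              rw [← Bool.not_eq_true, List.isPrefixOf_iff_prefix]; exact h1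
            have hb2 : (['_','2','p'] : List Char).isPrefixOf (c::t) = false := by
              rw [← Bool.not_eq_true, List.isPrefixOf_iff_prefix]; exact h2
            have hb3 : (['_','3','p'] : List Char).isPrefixOf (c::t) = false := by
              rw [← Bool.not_eq_true, List.isPrefixOf_iff_prefix]; exact h3
            rw [scanSubs]
            simp only [List.find?, hb1, hb2, hb3]
            rw [replace_cons _ _ _ _ h1]
            have h2' : ¬ (['_','2','p'] : List Char) <+: (c :: PySem.Chars.replace t ['_','p'] ['$','^','+','$']) := by
              intro hp
              rw [← replace_cons _ _ _ _ h1] at hp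
              exact h2 (prefix_of_replace ['_','p'] ['$','^','+','$'] (by decide) (by decide)
                (c::t).length _ (c::t) (le_refl _) (by decide) hp)
            rw [replace_cons _ _ _ _ h2']
            have h3' : ¬ (['_','3','p'] : List Char) <+:
                (c :: PySem.Chars.replace (PySem.Chars.replace t ['_','p'] ['$','^','+','$']) ['_','2','p'] ['$','^','{','+','+','}','$']) := by
              intro hp
              rw [← replace_cons _ _ _ _ h2', ← replace_cons _ _ _ _ h1] at hp
              have := prefix_of_replace ['_','2','p'] ['$','^','{','+','+','}','$'] (by decide) (by decide)
                (PySem.Chars.replace (c::t) ['_','p'] ['$','^','+','$']).length _ _ (le_refl _) (by decide) hp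
              exact h3 (prefix_of_replace ['_','p'] ['$','^','+','$'] (by decide) (by decide)
                (c::t).length _ (c::t) (le_refl _) (by decide) this)
            rw [replace_cons _ _ _ _ h3']
            have hsufft : t <:+ c :: t := ⟨[c], rfl⟩
            rw [ih t (by simp at hlen; omega)]

-- ===== VERDICT (by name: the statement is the Claim_ definition above) =====
theorem latex_to_dir_spec : Claim_equal_latex_to_dir := by
  intro s reverse _hdom hpre
  unfold Spec_latex_to_dir latex_to_dir latex_to_dir_alt
  cases reverse with
  | true =>
    simp only [List.map, List.foldl, if_true, PySem.Str.replace, String.toList_ofList]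
    exact congrArg String.ofList (main_rev (pyCapitalize s).toList.length _ (le_refl _)).symm
  | false =>
    obtain hpre | ⟨hp1, hp2, hp3⟩ := hpre
    · exact absurd hpre (by simp)
    · simp only [List.foldl, if_false, Bool.false_eq_true, PySem.Str.replace, String.toList_ofList]
      refine congrArg String.ofList ?_
      have hl1 : ¬ (['$','^','{','+','+','}','$','^','+','$'] <:+: (PySem.Str.lower s).toList) := by
        intro hi; rw [← Bool.not_eq_true, PySem.Str.isIn_iff_infix] at hp1; exact hp1 (by simpa using hi)
      have hl2 : ¬ (['$','^','{','3','+','}','$','^','+','$'] <:+: (PySem.Str.lower s).toList) := by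
        intro hi; rw [← Bool.not_eq_true, PySem.Str.isIn_iff_infix] at hp2; exact hp2 (by simpa using hi)
      have hl3 : ¬ (['$','^','{','3','+','}','$','^','{','+','+','}','$'] <:+: (PySem.Str.lower s).toList) := by
        intro hi; rw [← Bool.not_eq_true, PySem.Str.isIn_iff_infix] at hp3; exact hp3 (by simpa using hi)
      exact (main_fwd (PySem.Str.lower s).toList.length _ (le_refl _) hl1 hl2 hl3).symm
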